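-- pv_equiv track=rewrite | github.com/MrHarcombe/advent_of_code | 2023/day7.py | hand_value_card_values
-- ===== SOURCE A (Python) =====
-- from collections import Counter
--
-- cards = "23456789TJQKA"
--
-- def hand_value_card_values(cards_bid):
--     hand, bid = cards_bid
--     hand_count = Counter(hand)
--     counts = hand_count.most_common()
--     if counts[0][1] > 3:
--         rank = counts[0][1] + 2
--     elif counts[0][1] == 3 and counts[1][1] == 2:
--         rank = 5
--     elif counts[0][1] == 3:
--         rank = 4
--     elif counts[0][1] == 2 and counts[1][1] == 2:
--         rank = 3
--     elif counts[0][1] == 2: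
--         rank = 2
--     else:
--         rank = 1
--
--     return [rank] + [cards.index(card) for card in hand]
-- ===== SOURCE B (Python) =====
-- from collections import Counter
--
-- cards = "23456789TJQKA"
--
-- def hand_value_card_values(cards_bid):
--     hand, bid = cards_bid
--     freq = Counter(hand)
--     m = max(freq.values())
--     if m > 3:
--         rank = m + 2
--     elif m == 1:
--         rank = 1
--     elif m == 3:
--         threes = sum(1 for v in freq.values() if v == 3)
--         twos = sum(1 for v in freq.values() if v == 2)
--         rank = 5 if threes == 1 and twos >= 1 else 4
--     else:
--         twos = sum(1 for v in freq.values() if v == 2)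
--         rank = 3 if twos >= 2 else 2
--     return [rank] + [cards.index(card) for card in hand]
-- ===== Notes on version B (the rewrite author's own statement) =====
-- stated objective: alternative
-- what changed: B never sorts or ranks the counts positionally: where A inspects positions [0] and [1] of Counter.most_common(), B takes the maximum multiplicity and tallies how many distinct cards occur exactly three resp. exactly two times, deriving the rank from those unordered tallies.
import Mathlib
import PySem

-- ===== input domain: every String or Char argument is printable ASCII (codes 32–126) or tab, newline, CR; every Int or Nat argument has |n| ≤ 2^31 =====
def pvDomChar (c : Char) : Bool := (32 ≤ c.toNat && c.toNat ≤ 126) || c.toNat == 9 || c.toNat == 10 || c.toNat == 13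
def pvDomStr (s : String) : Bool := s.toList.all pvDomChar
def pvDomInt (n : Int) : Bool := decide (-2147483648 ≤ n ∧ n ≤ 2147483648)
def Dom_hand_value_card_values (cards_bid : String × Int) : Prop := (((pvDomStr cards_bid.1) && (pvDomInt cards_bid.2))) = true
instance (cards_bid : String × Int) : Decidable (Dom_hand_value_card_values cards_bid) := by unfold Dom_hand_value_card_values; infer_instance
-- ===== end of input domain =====

-- B drops A's most_common() sort and positional inspection of the two largest counts;
-- it ranks the hand from the maximum multiplicity plus unordered tallies of the
-- exactly-three and exactly-two multiplicities (objective: alternative).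

-- ===== PORT A =====
def pvCards : List Char := "23456789TJQKA".toList

def hand_value_card_values (cards_bid : String × Int) : List Int :=
  let hand := cards_bid.1.toList
  let hand_count := PySem.Dict.counter hand
  let counts := PySem.List.sorted hand_count.items (fun p => p.2) true
  let rank : Int :=
    match PySem.List.pyGet? counts 0 with
    | none => 0  -- IndexError (empty hand); excluded by Pre_
    | some c0 =>
      if c0.2 > 3 then c0.2 + 2
      else if c0.2 = 3 then
        match PySem.List.pyGet? counts 1 with
        | none => 0  -- IndexError; excluded by Pre_
        | some c1 => if c1.2 = 2 then 5 else 4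
      else if c0.2 = 2 then
        match PySem.List.pyGet? counts 1 with
        | none => 0  -- IndexError; excluded by Pre_
        | some c1 => if c1.2 = 2 then 3 else 2
      else 1
  rank :: hand.map (fun card =>
    match PySem.List.index? pvCards card with
    | some i => (i : Int)
    | none => 0)  -- ValueError; excluded by Pre_

-- ===== PORT B =====
def hand_value_card_values_alt (cards_bid : String × Int) : List Int :=
  let hand := cards_bid.1.toList
  let freq := PySem.Dict.counter hand
  let rank : Int :=
    match PySem.List.max? freq.values (fun v => v) with
    | none => 0  -- ValueError: max() of empty (empty hand); excluded by Pre_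
    | some m =>
      if m > 3 then m + 2
      else if m = 1 then 1
      else if m = 3 then
        let threes := freq.values.foldl (fun acc v => if v == 3 then acc + 1 else acc) (0 : Int)
        let twos := freq.values.foldl (fun acc v => if v == 2 then acc + 1 else acc) (0 : Int)
        if threes = 1 ∧ 1 ≤ twos then 5 else 4
      else
        let twos := freq.values.foldl (fun acc v => if v == 2 then acc + 1 else acc) (0 : Int)
        if 2 ≤ twos then 3 else 2
  rank :: hand.map (fun card =>
    match PySem.List.index? pvCards card with
    | some i => (i : Int)
    | none => 0)  -- ValueError; excluded by Pre_

-- ===== PRECONDITION & SPEC =====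
-- Pre_ excludes exactly the inputs on which the Python A raises: an empty hand (IndexError on
-- counts[0]), a card not in "23456789TJQKA" (ValueError from cards.index), and a hand that is
-- 2 or 3 copies of one single card (IndexError on counts[1]).
def Pre_hand_value_card_values (cards_bid : String × Int) : Prop :=
  cards_bid.1.toList ≠ [] ∧
  cards_bid.1.toList.all (fun c => decide (c ∈ "23456789TJQKA".toList)) = true ∧
  ¬((cards_bid.1.toList.length = 2 ∨ cards_bid.1.toList.length = 3) ∧
     cards_bid.1.toList.all (fun a => cards_bid.1.toList.all (fun b => a == b)) = true)
instance (cards_bid : String × Int) : Decidable (Pre_hand_value_card_values cards_bid) := by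
  unfold Pre_hand_value_card_values; infer_instance

def pvWitness_hand_value_card_values : (String × Int) := ("AAAKK", 123)

def Spec_hand_value_card_values (cards_bid : String × Int) (out : List Int) : Prop := out = hand_value_card_values_alt cards_bid
instance (cards_bid : String × Int) (out : List Int) : Decidable (Spec_hand_value_card_values cards_bid out) := by unfold Spec_hand_value_card_values; infer_instance

-- ===== CLAIM (what is proved, stated in full; the proofs are below) =====
def Claim_equal_hand_value_card_values : Prop := ∀ (cards_bid : String × Int), Dom_hand_value_card_values cards_bid → Pre_hand_value_card_values cards_bid → Spec_hand_value_card_values cards_bid (hand_value_card_values cards_bid)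

-- ===== LEMMAS AND PROOFS =====

-- the value sequence of A's reverse-sorted items equals the reverse-sorted value list
lemma pv_map_snd_sorted_rev {α : Type} (xs : List (α × Int)) :
    (PySem.List.sorted xs (fun p => p.2) true).map (fun p => p.2)
      = PySem.List.sorted (xs.map (fun p => p.2)) (fun v => v) true := by
  have hperm : ((PySem.List.sorted xs (fun p => p.2) true).map (fun p => p.2)).Perm
      (PySem.List.sorted (xs.map (fun p => p.2)) (fun v => v) true) :=
    ((PySem.List.sorted_perm xs (fun p => p.2) true).map _).trans
      (PySem.List.sorted_perm (xs.map (fun p => p.2)) (fun v => v) true).symm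
  have pw1 : ((PySem.List.sorted xs (fun p => p.2) true).map (fun p => p.2)).Pairwise
      (fun a b : Int => b ≤ a) :=
    (PySem.List.sorted_pairwise_rev xs (fun p => p.2)).map _ (fun _ _ h => h)
  have pw2 : (PySem.List.sorted (xs.map (fun p => p.2)) (fun v => v) true).Pairwise
      (fun a b : Int => b ≤ a) :=
    PySem.List.sorted_pairwise_rev (xs.map (fun p => p.2)) (fun v => v)
  exact List.Perm.eq_of_pairwise (fun a b _ _ h1 h2 => le_antisymm h2 h1) pw1 pw2 hperm

lemma pv_get1_single {α : Type} (x : α) : PySem.List.pyGet? [x] 1 = none := rfl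

lemma pv_get1_cons {α : Type} (x y : α) (t : List α) :
    PySem.List.pyGet? (x :: y :: t) 1 = some y := by
  have h := PySem.List.pyGet?_ofNat (x :: y :: t) 1 (by simp)
  rw [show ((1 : Nat) : Int) = (1 : Int) from rfl] at h
  rw [h]; rfl

theorem hand_value_card_values_spec : Claim_equal_hand_value_card_values := by
  intro cb _hdom hpre
  obtain ⟨hne, _hsubB, hnot3B⟩ := hpre
  have hnot3 : ¬((cb.1.toList.length = 2 ∨ cb.1.toList.length = 3) ∧
      ∀ a ∈ cb.1.toList, ∀ b ∈ cb.1.toList, a = b) := by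
    intro ⟨hlen, hallp⟩
    exact hnot3B ⟨hlen, List.all_eq_true.2 (fun a ha => List.all_eq_true.2
      (fun b hb => beq_iff_eq.2 (hallp a ha b hb)))⟩
  unfold Spec_hand_value_card_values
  simp only [hand_value_card_values, hand_value_card_values_alt]
  refine congrArg₂ List.cons ?_ rfl
  -- rank equality
  set L := cb.1.toList with hLdef
  have hv : (PySem.Dict.counter L).values = (PySem.Dict.counter L).items.map (fun p => p.2) := rfl
  set counts := PySem.List.sorted (PySem.Dict.counter L).items (fun p => p.2) true with hC
  set V := PySem.List.sorted (PySem.Dict.counter L).values (fun v => v) true with hV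
  have hmap : counts.map (fun p => p.2) = V := by
    rw [hC, hV, hv, pv_map_snd_sorted_rev]
  have hmemW : ∀ p ∈ counts, ∃ k, k ∈ L ∧ p = (k, (L.count k : Int)) := by
    intro p hp
    have hp' : p ∈ (PySem.Dict.counter L).items := (PySem.List.mem_sorted _ _ _ _).1 hp
    rw [PySem.Dict.items_counter] at hp'
    obtain ⟨k, hk, rfl⟩ := List.mem_map.1 hp'
    exact ⟨k, (PySem.Set.mem_ofList L k).1 hk, rfl⟩
  have hmemC : ∀ a ∈ L, (a, (L.count a : Int)) ∈ counts := by
    intro a ha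
    rw [hC, PySem.List.mem_sorted, PySem.Dict.items_counter]
    exact List.mem_map_of_mem ((PySem.Set.mem_ofList L a).2 ha)
  have hpos : ∀ p ∈ counts, 1 ≤ p.2 := by
    intro p hp
    obtain ⟨k, hk, rfl⟩ := hmemW p hp
    show (1 : Int) ≤ ((L.count k : Int))
    exact_mod_cast List.count_pos_iff.2 hk
  have hVpos : ∀ x ∈ V, (1 : Int) ≤ x := by
    intro x hx
    rw [← hmap] at hx
    obtain ⟨p, hp, rfl⟩ := List.mem_map.1 hx
    exact hpos p hp
  have hcne : counts ≠ [] := by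
    obtain ⟨c, hc⟩ := List.exists_mem_of_ne_nil L hne
    intro h
    exact absurd (hmemC c hc) (by rw [h]; exact List.not_mem_nil)
  obtain ⟨c0, rest, hcons⟩ := List.exists_cons_of_ne_nil hcne
  have hpw : counts.Pairwise (fun a b => b.2 ≤ a.2) := PySem.List.sorted_pairwise_rev _ _
  have hVcons : V = c0.2 :: rest.map (fun p => p.2) := by
    rw [← hmap, hcons]; rfl
  -- B's max is the head count c0.2
  have hheadmax : ∀ y ∈ (PySem.Dict.counter L).values, y ≤ c0.2 :=
    PySem.List.key_head_sorted_rev_ge (PySem.Dict.counter L).values (fun v => v) hVcons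
  have hheadmem : c0.2 ∈ (PySem.Dict.counter L).values := by
    have : c0.2 ∈ V := by rw [hVcons]; exact List.mem_cons_self
    exact (PySem.List.mem_sorted _ _ _ _).1 this
  have hvne : (PySem.Dict.counter L).values ≠ [] := by
    intro h
    exact absurd hheadmem (by rw [h]; exact List.not_mem_nil)
  rcases hM : PySem.List.max? (PySem.Dict.counter L).values (fun v => v) with _ | M
  · exact absurd ((PySem.List.max?_eq_none_iff _ _).1 hM) hvne
  have hMeq : M = c0.2 := by
    have h1 : M ∈ (PySem.Dict.counter L).values := PySem.List.max?_mem hM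
    have h2 : M ≤ c0.2 := hheadmax M h1
    have h3 : c0.2 ≤ M := PySem.List.max?_isMax hM c0.2 hheadmem
    omega
  -- counting in values = counting in V
  have hcntV : ∀ v : Int, (PySem.Dict.counter L).values.count v = V.count v :=
    fun v => (List.Perm.count_eq (PySem.List.sorted_perm _ _ _).symm v)
  rw [hcons] at hmap
  rw [hcons]
  simp only [PySem.List.pyGet?_zero_cons,
    PySem.List.foldl_beq_add_one, zero_add, hMeq]
  have h1 : (1 : Int) ≤ c0.2 := hpos c0 (by rw [hcons]; exact List.mem_cons_self)
  rcases rest with _ | ⟨c1, rest2⟩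
  · -- counts = [c0] : one single distinct card
    obtain ⟨k, hkL, hk⟩ := hmemW c0 (by rw [hcons]; exact List.mem_cons_self)
    have hall : ∀ a ∈ L, a = k := by
      intro a ha
      have hmem := hmemC a ha
      rw [hcons, List.mem_singleton] at hmem
      have := congrArg Prod.fst hmem
      simpa [hk] using this
    have hcount : L.count k = L.length := List.count_eq_length.2 (fun b hb => (hall b hb).symm)
    have hc02 : c0.2 = (L.length : Int) := by
      rw [hk]
      show ((L.count k : Int)) = (L.length : Int)
      exact_mod_cast hcount
    simp only [pv_get1_single]
    by_cases hm : c0.2 > 3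
    · simp [hm]
    · have hne2 : c0.2 ≠ 2 := fun h2 =>
        hnot3 ⟨Or.inl (by omega), fun a ha b hb => (hall a ha).trans (hall b hb).symm⟩
      have hne3 : c0.2 ≠ 3 := fun h3 =>
        hnot3 ⟨Or.inr (by omega), fun a ha b hb => (hall a ha).trans (hall b hb).symm⟩
      have h1' : c0.2 = 1 := by omega
      simp [h1']
  · -- counts = c0 :: c1 :: rest2
    have hv1 : (1 : Int) ≤ c1.2 :=
      hpos c1 (by rw [hcons]; exact List.mem_cons_of_mem _ List.mem_cons_self)
    have hle : c1.2 ≤ c0.2 := by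
      rw [hcons] at hpw
      exact (List.pairwise_cons.1 hpw).1 c1 List.mem_cons_self
    have hVform : V = c0.2 :: c1.2 :: rest2.map (fun p => p.2) := by
      rw [hVcons]; rfl
    have hVpw : V.Pairwise (fun a b : Int => b ≤ a) :=
      PySem.List.sorted_pairwise_rev _ _
    have htail : ∀ x ∈ rest2.map (fun p : Char × Int => p.2), x ≤ c1.2 := by
      rw [hVform] at hVpw
      exact fun x hx => ((List.pairwise_cons.1 (List.pairwise_cons.1 hVpw).2).1 x hx)
    simp only [pv_get1_cons, hcntV, hVform]
    by_cases hm : c0.2 > 3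
    · simp [hm]
    · by_cases hm3 : c0.2 = 3
      · rw [if_neg hm, if_neg hm, if_pos hm3, if_neg (show ¬c0.2 = 1 by omega), if_pos hm3, hm3]
        by_cases hc12 : c1.2 = 2
        · have hW3 : (rest2.map (fun p : Char × Int => p.2)).count 3 = 0 :=
            List.count_eq_zero.2 (fun hc => by have := htail _ hc; omega)
          have hcnt3 : ((3:Int) :: c1.2 :: rest2.map (fun p : Char × Int => p.2)).count 3 = 1 := by
            rw [hc12]
            simp [hW3]
          have hcnt2 : 0 < ((3:Int) :: c1.2 :: rest2.map (fun p : Char × Int => p.2)).count 2 :=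
            List.count_pos_iff.2 (by rw [hc12]; exact List.mem_cons_of_mem _ List.mem_cons_self)
          rw [if_pos hc12, if_pos ⟨by exact_mod_cast hcnt3, by exact_mod_cast hcnt2⟩]
        · rw [if_neg hc12, if_neg]
          rintro ⟨h3, h2⟩
          by_cases hc13 : c1.2 = 3
          · rw [hc13] at h3
            have h3' : ((3:Int) :: (3:Int) :: rest2.map (fun p : Char × Int => p.2)).count 3 = 1 := by
              exact_mod_cast h3
            simp at h3'
          · have hc1le : c1.2 ≤ 1 := by omega
            have hcnt2 : ((3:Int) :: c1.2 :: rest2.map (fun p : Char × Int => p.2)).count 2 = 0 := by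
              refine List.count_eq_zero.2 ?_
              intro hmem
              rcases List.mem_cons.1 hmem with h | hmem2
              · norm_num at h
              · rcases List.mem_cons.1 hmem2 with h | h
                · exact hc12 h.symm
                · have := htail _ h; omega
            rw [hcnt2] at h2
            exact absurd h2 (by norm_num)
      · by_cases hm2 : c0.2 = 2
        · rw [if_neg hm, if_neg hm, if_neg (show ¬c0.2 = 3 by omega), if_pos hm2,
            if_neg (show ¬c0.2 = 1 by omega), if_neg (show ¬c0.2 = 3 by omega), hm2]
          by_cases hc12 : c1.2 = 2
          · have hcnt2 : 2 ≤ ((2:Int) :: c1.2 :: rest2.map (fun p : Char × Int => p.2)).count 2 := by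
              rw [hc12]
              simp
            rw [if_pos hc12, if_pos (by exact_mod_cast hcnt2)]
          · rw [if_neg hc12, if_neg]
            intro h2
            have hc1le : c1.2 ≤ 1 := by omega
            have hcnt2 : ((2:Int) :: c1.2 :: rest2.map (fun p : Char × Int => p.2)).count 2 = 1 := by
              have hW2 : (rest2.map (fun p : Char × Int => p.2)).count 2 = 0 :=
                List.count_eq_zero.2 (fun hc => by have := htail _ hc; omega)
              have hne2 : ¬((2:Int) == c1.2) = true := by
                simp
                intro h
                exact hc12 h.symm
              simp [List.count_cons, hW2]
              exact hc12
            rw [hcnt2] at h2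
            exact absurd h2 (by norm_num)
        · have h1' : c0.2 = 1 := by omega
          simp [h1']
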